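-- pv_equiv track=rewrite | github.com/bcblevins/storyteller-stream-relay | directory_report.py | longest_backtick_run
-- ===== SOURCE A (Python) =====
-- def longest_backtick_run(s: str) -> int:
--     longest = 0
--     cur = 0
--     for ch in s:
--         if ch == "`":
--             cur += 1
--             if cur > longest:
--                 longest = cur
--         else:
--             cur = 0
--     return longest
-- ===== SOURCE B (Python) =====
-- def longest_backtick_run(s: str) -> int:
--     # Binary search on the answer: the longest run is the largest k such that
--     # a string of k consecutive backticks occurs as a substring of s.
--     lo, hi = 0, len(s)
--     while lo < hi:
--         mid = (lo + hi + 1) // 2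
--         if "`" * mid in s:
--             lo = mid
--         else:
--             hi = mid - 1
--     return lo
-- ===== Notes on version B (the rewrite author's own statement) =====
-- stated objective: alternative
-- what changed: Replaces A's single-pass running-counter state machine with a binary search on the answer k, each probe testing whether k consecutive backticks occur as a substring of s.
import Mathlib
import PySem

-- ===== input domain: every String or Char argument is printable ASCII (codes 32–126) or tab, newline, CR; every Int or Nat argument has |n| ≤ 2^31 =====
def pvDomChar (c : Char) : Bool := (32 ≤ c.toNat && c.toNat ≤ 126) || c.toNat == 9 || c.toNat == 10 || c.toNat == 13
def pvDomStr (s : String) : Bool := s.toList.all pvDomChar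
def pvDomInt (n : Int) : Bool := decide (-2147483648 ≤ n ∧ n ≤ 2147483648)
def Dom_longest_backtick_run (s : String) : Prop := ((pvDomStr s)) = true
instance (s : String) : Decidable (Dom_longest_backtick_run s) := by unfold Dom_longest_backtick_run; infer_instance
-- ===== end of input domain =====

-- B replaces A's single-pass running-counter scan by a binary search on the answer k,
-- each probe testing whether k consecutive backticks occur as a substring (objective: alternative algorithm).

-- ===== PORT A =====
-- one loop iteration of A: state (longest, cur)
def stepA (st : Int × Int) (ch : Char) : Int × Int :=
  if ch = '`' then
    let cur := st.2 + 1
    if cur > st.1 then (cur, cur) else (st.1, cur)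
  else (st.1, 0)

def longest_backtick_run (s : String) : Int :=
  (s.toList.foldl stepA (0, 0)).1

-- ===== PORT B =====
-- the while-loop of Source B; '"`" * mid in s' is PySem.Chars.isIn (List.replicate mid '`') cs (exact: Python 'in' is substring/infix)
def bsLoop (cs : List Char) (lo hi : Nat) : Nat :=
  if lo < hi then
    let mid := (lo + hi + 1) / 2
    if PySem.Chars.isIn (List.replicate mid '`') cs then bsLoop cs mid hi
    else bsLoop cs lo (mid - 1)
  else lo
termination_by hi - lo
decreasing_by all_goals omega

def longest_backtick_run_alt (s : String) : Int :=
  (bsLoop s.toList 0 s.toList.length : Int)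

-- ===== PRECONDITION & SPEC =====
def Spec_longest_backtick_run (s : String) (out : Int) : Prop := out = longest_backtick_run_alt s
instance (s : String) (out : Int) : Decidable (Spec_longest_backtick_run s out) := by unfold Spec_longest_backtick_run; infer_instance

-- ===== CLAIM (what is proved, stated in full; the proofs are below) =====
def Claim_equal_longest_backtick_run : Prop := ∀ (s : String), Dom_longest_backtick_run s → Spec_longest_backtick_run s (longest_backtick_run s)

-- ===== LEMMAS AND PROOFS =====

-- proof-only helper: the lengths of all maximal backtick runs, left to right
def btRuns : List Char → List Int
  | [] => []
  | c :: rest =>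
    if c = '`' then
      ((rest.takeWhile (· == '`')).length + 1 : Int) :: btRuns (rest.dropWhile (· == '`'))
    else btRuns rest
termination_by cs => cs.length
decreasing_by
  · exact Nat.lt_succ_of_le (List.length_dropWhile_le _ _)
  · exact Nat.lt_succ_of_le (Nat.le_refl _)

theorem stepA_tick (L c : Int) : stepA (L, c) '`' = (max L (c + 1), c + 1) := by
  simp only [stepA, if_true]
  split_ifs with h <;> simp <;> omega

theorem stepA_other (L c : Int) (x : Char) (hx : x ≠ '`') : stepA (L, c) x = (L, 0) := by
  simp [stepA, hx]

theorem dropWhile_head_false (l : List Char) (p : Char → Bool) (x : Char) (r' : List Char)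
    (h : l.dropWhile p = x :: r') : p x = false := by
  induction l with
  | nil => simp [List.dropWhile] at h
  | cons a t ih =>
      by_cases hpa : p a = true
      · rw [List.dropWhile_cons_of_pos hpa] at h
        exact ih h
      · rw [List.dropWhile_cons_of_neg (by simpa using hpa)] at h
        cases h
        simpa using hpa

-- consuming a block of backticks from state (L, c)
theorem runFold (run : List Char) (h : ∀ x ∈ run, x = '`') :
    ∀ (L c : Int), c ≤ L →
      run.foldl stepA (L, c) = (max L (c + run.length), c + run.length) := by
  induction run with
  | nil =>
      intro L c hc
      simp
      omega
  | cons a t ih =>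
      intro L c hc
      have ha : a = '`' := h a (List.mem_cons_self)
      have ht : ∀ x ∈ t, x = '`' := fun x hx => h x (List.mem_cons_of_mem _ hx)
      simp only [List.foldl_cons, ha, stepA_tick]
      rw [ih ht (max L (c + 1)) (c + 1) (le_max_right _ _)]
      simp only [List.length_cons, Prod.mk.injEq]
      push_cast
      constructor <;> omega

theorem foldl_max_max (xs : List Int) : ∀ (a b : Int),
    xs.foldl max (max a b) = max a (xs.foldl max b) := by
  induction xs with
  | nil => intro a b; simp
  | cons x t ih =>
      intro a b
      simp only [List.foldl_cons]
      rw [show max (max a b) x = max a (max b x) from max_assoc a b x, ih]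

theorem foldl_max_le (xs : List Int) : ∀ (a : Int), a ≤ xs.foldl max a := by
  induction xs with
  | nil => intro a; simp
  | cons x t ih =>
      intro a
      exact le_trans (le_max_left a x) (ih (max a x))

theorem foldl_max_mem_le (xs : List Int) : ∀ (a : Int), ∀ x ∈ xs, x ≤ xs.foldl max a := by
  induction xs with
  | nil => intro a x hx; simp at hx
  | cons y t ih =>
      intro a x hx
      rcases List.mem_cons.mp hx with h | h
      · subst h; exact le_trans (le_max_right a x) (foldl_max_le t _)
      · exact ih (max a y) x h

theorem foldl_max_attained (xs : List Int) : ∀ (a : Int),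
    xs.foldl max a = a ∨ xs.foldl max a ∈ xs := by
  induction xs with
  | nil => intro a; left; rfl
  | cons y t ih =>
      intro a
      rcases ih (max a y) with h | h
      · simp only [List.foldl_cons, h]
        rcases max_choice a y with h' | h'
        · left; exact h'
        · right; rw [h']; exact List.mem_cons_self
      · right; exact List.mem_cons_of_mem _ h

-- A's fold equals the maximum of the maximal-run lengths
theorem mainLem : ∀ (n : Nat) (cs : List Char), cs.length ≤ n → ∀ (L : Int), 0 ≤ L →
    (cs.foldl stepA (L, 0)).1 = max L ((btRuns cs).foldl max 0) := by
  intro n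
  induction n with
  | zero =>
      intro cs hcs L hL
      have : cs = [] := List.eq_nil_of_length_eq_zero (Nat.le_zero.mp hcs)
      subst this
      simp [btRuns]
      omega
  | succ n ih =>
      intro cs hcs L hL
      match cs with
      | [] =>
          simp [btRuns]
          omega
      | c :: rest =>
          by_cases hc : c = '`'
          · subst hc
            have hrest : rest.length ≤ n := by
              simp only [List.length_cons] at hcs
              omega
            rcases hd : rest.dropWhile (· == '`') with _ | ⟨x, r'⟩
            · have hall : rest.takeWhile (· == '`') = rest := by
                conv_rhs => rw [← List.takeWhile_append_dropWhile (p := (· == '`')) (l := rest)]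
                rw [hd, List.append_nil]
              have hticks : ∀ y ∈ rest, y = '`' := by
                intro y hy
                rw [← hall] at hy
                have := List.mem_takeWhile_imp (p := (· == '`')) (l := rest) hy
                exact eq_of_beq this
              have hbt : btRuns ('`' :: rest) = [((rest.length : Int) + 1)] := by
                rw [btRuns]
                simp [hall, hd, btRuns]
              rw [hbt]
              simp only [List.foldl_cons, stepA_tick, List.foldl_nil]
              rw [show ((0:Int) + 1) = 1 by norm_num]
              rw [runFold rest hticks (max L 1) 1 (le_max_right _ _)]
              simp only
              omega
            · have hx : x ≠ '`' := by
                have := dropWhile_head_false rest (· == '`') x r' hd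
                simpa using this
              have hsplit : rest.takeWhile (· == '`') ++ (x :: r') = rest := by
                conv_rhs => rw [← List.takeWhile_append_dropWhile (p := (· == '`')) (l := rest)]
                rw [hd]
              have hticks : ∀ y ∈ rest.takeWhile (· == '`'), y = '`' := by
                intro y hy
                have := List.mem_takeWhile_imp (p := (· == '`')) (l := rest) hy
                exact eq_of_beq this
              have hlen : (rest.takeWhile (· == '`')).length + (r'.length + 1) = rest.length := by
                have := congrArg List.length hsplit
                simpa using this
              have hr'n : r'.length ≤ n := by omega
              have hbt : btRuns ('`' :: rest)
                  = (((rest.takeWhile (· == '`')).length : Int) + 1) :: btRuns r' := by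
                rw [btRuns]
                simp only [hd, if_true]
                rw [show btRuns (x :: r') = btRuns r' by rw [btRuns]; simp [hx]]
              rw [hbt]
              have hfold : ('`' :: rest).foldl stepA (L, 0)
                  = (x :: r').foldl stepA
                      (max (max L 1) (1 + ((rest.takeWhile (· == '`')).length : Int)),
                       1 + ((rest.takeWhile (· == '`')).length : Int)) := by
                conv_lhs => rw [show ('`' :: rest) = '`' :: (rest.takeWhile (· == '`') ++ (x :: r')) by rw [hsplit]]
                simp only [List.foldl_cons, List.foldl_append, stepA_tick]
                rw [show ((0:Int) + 1) = 1 by norm_num]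
                rw [runFold _ hticks (max L 1) 1 (le_max_right _ _)]
              rw [hfold]
              simp only [List.foldl_cons, stepA_other _ _ x hx]
              rw [ih r' hr'n _ (by positivity)]
              rw [show max (0:Int) (((rest.takeWhile (· == '`')).length : Int) + 1)
                    = max (((rest.takeWhile (· == '`')).length : Int) + 1) 0 from max_comm _ _]
              rw [foldl_max_max]
              omega
          · have hbt : btRuns (c :: rest) = btRuns rest := by rw [btRuns]; simp [hc]
            simp only [List.foldl_cons, stepA_other _ _ c hc, hbt]
            refine ih rest ?_ L hL
            simp only [List.length_cons] at hcs
            omega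

theorem btRuns_pos_aux : ∀ (n : Nat) (cs : List Char), cs.length ≤ n → ∀ r ∈ btRuns cs, 1 ≤ r := by
  intro n
  induction n with
  | zero =>
      intro cs hcs r hr
      have : cs = [] := List.eq_nil_of_length_eq_zero (Nat.le_zero.mp hcs)
      subst this
      simp [btRuns] at hr
  | succ n ih =>
      intro cs hcs r hr
      match cs with
      | [] => simp [btRuns] at hr
      | c :: rest =>
          by_cases hc : c = '`'
          · rw [btRuns, if_pos hc] at hr
            rcases List.mem_cons.mp hr with h | h
            · subst h; omega
            · refine ih _ ?_ r h
              have := List.length_dropWhile_le (· == '`') rest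
              simp only [List.length_cons] at hcs
              omega
          · rw [btRuns, if_neg hc] at hr
            refine ih rest ?_ r hr
            simp only [List.length_cons] at hcs
            omega

theorem btRuns_pos (cs : List Char) : ∀ r ∈ btRuns cs, 1 ≤ r :=
  btRuns_pos_aux cs.length cs (le_refl _)

-- a run of k backticks occurs in cs  ↔  some maximal run has length ≥ k (k ≥ 1)
theorem repl_prefix_bound (k : Nat) (xs : List Char) (_hxs : ∀ y ∈ xs, y = '`')
    (x : Char) (hx : x ≠ '`') (d : List Char)
    (h : List.replicate k '`' <+: xs ++ x :: d) : k ≤ xs.length := by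
  by_contra hgt
  push Not at hgt
  have hi : xs.length < (List.replicate k '`').length := by simpa using hgt
  have hi2 : xs.length < (xs ++ x :: d).length := by simp
  have := h.getElem (i := xs.length) hi
  rw [List.getElem_replicate] at this
  rw [List.getElem_append_right (le_refl _)] at this
  simp at this
  exact hx this.symm

theorem repl_infix_split (k : Nat) (hk : 1 ≤ k) :
    ∀ (xs : List Char), (∀ y ∈ xs, y = '`') → ∀ (x : Char), x ≠ '`' → ∀ (d : List Char),
    List.replicate k '`' <:+: xs ++ x :: d → k ≤ xs.length ∨ List.replicate k '`' <:+: d := by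
  intro xs
  induction xs with
  | nil =>
      intro _ x hx d h
      simp only [List.nil_append] at h
      rcases List.infix_cons_iff.mp h with h | h
      · exfalso
        rcases k with _ | k'
        · omega
        · have := h.getElem (i := 0) (by simp)
          simp at this
          exact hx this.symm
      · exact Or.inr h
  | cons a t ih =>
      intro hall x hx d h
      have ha : a = '`' := hall a List.mem_cons_self
      have ht : ∀ y ∈ t, y = '`' := fun y hy => hall y (List.mem_cons_of_mem _ hy)
      rcases List.infix_cons_iff.mp h with h | h
      · left
        subst ha
        exact le_trans (repl_prefix_bound k ('`' :: t) hall x hx d (by simpa using h)) (le_refl _)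
      · rcases ih ht x hx d h with h' | h'
        · left; simp; omega
        · exact Or.inr h'

theorem repl_infix_iff (k : Nat) (hk : 1 ≤ k) : ∀ (n : Nat) (cs : List Char), cs.length ≤ n →
    (List.replicate k '`' <:+: cs ↔ ∃ r ∈ btRuns cs, (k : Int) ≤ r) := by
  intro n
  induction n with
  | zero =>
      intro cs hcs
      have : cs = [] := List.eq_nil_of_length_eq_zero (Nat.le_zero.mp hcs)
      subst this
      constructor
      · intro h
        have := h.length_le
        simp at this
        omega
      · intro ⟨r, hr, _⟩; simp [btRuns] at hr
  | succ n ih =>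
      intro cs hcs
      match cs with
      | [] =>
          constructor
          · intro h
            have := h.length_le
            simp at this
            omega
          · intro ⟨r, hr, _⟩; simp [btRuns] at hr
      | c :: rest =>
          by_cases hc : c = '`'
          · subst hc
            have hrest : rest.length ≤ n := by simp only [List.length_cons] at hcs; omega
            have hticks : ∀ y ∈ rest.takeWhile (· == '`'), y = '`' := by
              intro y hy
              exact eq_of_beq (List.mem_takeWhile_imp (p := (· == '`')) (l := rest) hy)
            rcases hd : rest.dropWhile (· == '`') with _ | ⟨x, r'⟩
            · -- whole string is backticks
              have hall : rest.takeWhile (· == '`') = rest := by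
                conv_rhs => rw [← List.takeWhile_append_dropWhile (p := (· == '`')) (l := rest)]
                rw [hd, List.append_nil]
              have hticksr : ∀ y ∈ '`' :: rest, y = '`' := by
                intro y hy
                rcases List.mem_cons.mp hy with h | h
                · exact h
                · rw [← hall] at h; exact hticks y h
              have hbt : btRuns ('`' :: rest) = [((rest.length : Int) + 1)] := by
                rw [btRuns]; simp [hall, hd, btRuns]
              rw [hbt]
              constructor
              · intro h
                have := h.length_le
                simp at this
                exact ⟨(rest.length : Int) + 1, by simp, by omega⟩
              · intro ⟨r, hr, hkr⟩
                simp at hr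
                subst hr
                have hkle : k ≤ rest.length + 1 := by
                  have : (k : Int) ≤ (rest.length : Int) + 1 := hkr
                  exact_mod_cast this
                refine List.IsPrefix.isInfix ?_
                have : List.replicate k '`' <+: List.replicate (rest.length + 1) '`' := by
                  refine ⟨List.replicate (rest.length + 1 - k) '`', ?_⟩
                  rw [← List.replicate_add]
                  congr 1
                  omega
                have heq : '`' :: rest = List.replicate (rest.length + 1) '`' := by
                  refine List.eq_replicate_iff.mpr ⟨by simp, hticksr⟩
                rw [heq]
                exact this
            · -- run then a non-backtick x then r'
              have hx : x ≠ '`' := by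
                have := dropWhile_head_false rest (· == '`') x r' hd
                simpa using this
              have hsplit : rest.takeWhile (· == '`') ++ (x :: r') = rest := by
                conv_rhs => rw [← List.takeWhile_append_dropWhile (p := (· == '`')) (l := rest)]
                rw [hd]
              have hlen : (rest.takeWhile (· == '`')).length + (r'.length + 1) = rest.length := by
                have := congrArg List.length hsplit
                simpa using this
              have hr'n : r'.length ≤ n := by omega
              have hbt : btRuns ('`' :: rest)
                  = (((rest.takeWhile (· == '`')).length : Int) + 1) :: btRuns r' := by
                rw [btRuns]
                simp only [hd, if_true]
                rw [show btRuns (x :: r') = btRuns r' by rw [btRuns]; simp [hx]]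
              have hshape : '`' :: rest = ('`' :: rest.takeWhile (· == '`')) ++ x :: r' := by
                simp [hsplit]
              have hticksc : ∀ y ∈ '`' :: rest.takeWhile (· == '`'), y = '`' := by
                intro y hy
                rcases List.mem_cons.mp hy with h | h
                · exact h
                · exact hticks y h
              rw [hbt]
              constructor
              · intro h
                rw [hshape] at h
                rcases repl_infix_split k hk _ hticksc x hx r' h with h' | h'
                · exact ⟨(((rest.takeWhile (· == '`')).length : Int) + 1), List.mem_cons_self,
                    by simp at h' ⊢; omega⟩
                · rcases (ih r' hr'n).mp h' with ⟨r, hr, hkr⟩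
                  exact ⟨r, List.mem_cons_of_mem _ hr, hkr⟩
              · intro ⟨r, hr, hkr⟩
                rcases List.mem_cons.mp hr with h | h
                · -- fits in the leading run
                  have hkle : k ≤ (rest.takeWhile (· == '`')).length + 1 := by
                    rw [h] at hkr
                    exact_mod_cast hkr
                  refine List.IsPrefix.isInfix ?_
                  have heq : '`' :: rest.takeWhile (· == '`')
                      = List.replicate ((rest.takeWhile (· == '`')).length + 1) '`' :=
                    List.eq_replicate_iff.mpr ⟨by simp, hticksc⟩
                  rw [hshape]
                  refine List.IsPrefix.trans ?_ (List.prefix_append _ _)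
                  rw [heq]
                  refine ⟨List.replicate ((rest.takeWhile (· == '`')).length + 1 - k) '`', ?_⟩
                  rw [← List.replicate_add]
                  congr 1
                  omega
                · have hinf : List.replicate k '`' <:+: r' := (ih r' hr'n).mpr ⟨r, h, hkr⟩
                  refine hinf.trans ?_
                  rw [hshape]
                  exact ((List.suffix_cons x r').trans (List.suffix_append _ _)).isInfix
          · have hbt : btRuns (c :: rest) = btRuns rest := by rw [btRuns]; simp [hc]
            have hrest : rest.length ≤ n := by simp only [List.length_cons] at hcs; omega
            rw [hbt, ← ih rest hrest]
            constructor
            · intro h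
              rcases List.infix_cons_iff.mp h with h | h
              · exfalso
                rcases k with _ | k'
                · omega
                · have := h.getElem (i := 0) (by simp)
                  simp at this
                  exact hc this.symm
              · exact h
            · intro h
              exact h.trans (List.suffix_cons c rest).isInfix

-- the monotone predicate probed by the binary search
theorem isIn_antitone (cs : List Char) (j k : Nat) (hjk : j ≤ k)
    (h : PySem.Chars.isIn (List.replicate k '`') cs = true) :
    PySem.Chars.isIn (List.replicate j '`') cs = true := by
  rw [PySem.Chars.isIn_iff_infix] at h ⊢
  refine List.IsPrefix.isInfix ?_ |>.trans h
  exact ⟨List.replicate (k - j) '`', by rw [← List.replicate_add]; congr 1; omega⟩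

theorem bsLoop_spec (cs : List Char) : ∀ (n lo hi : Nat), hi - lo ≤ n → lo ≤ hi →
    PySem.Chars.isIn (List.replicate lo '`') cs = true →
    PySem.Chars.isIn (List.replicate (hi + 1) '`') cs = false →
    PySem.Chars.isIn (List.replicate (bsLoop cs lo hi) '`') cs = true ∧
    PySem.Chars.isIn (List.replicate (bsLoop cs lo hi + 1) '`') cs = false := by
  intro n
  induction n with
  | zero =>
      intro lo hi hn hle hlo hhi
      have heq : hi = lo := by omega
      rw [heq] at hhi ⊢
      rw [bsLoop, if_neg (by omega)]
      exact ⟨hlo, hhi⟩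
  | succ n ih =>
      intro lo hi hn hle hlo hhi
      by_cases hlt : lo < hi
      · rw [bsLoop, if_pos hlt]
        simp only
        set mid := (lo + hi + 1) / 2 with hmid
        have h1 : lo + 1 ≤ mid ∧ mid ≤ hi := by constructor <;> omega
        by_cases hin : PySem.Chars.isIn (List.replicate mid '`') cs = true
        · rw [if_pos hin]
          exact ih mid hi (by omega) (by omega) hin hhi
        · rw [if_neg hin]
          refine ih lo (mid - 1) (by omega) (by omega) hlo ?_
          rw [show mid - 1 + 1 = mid by omega]
          exact Bool.eq_false_iff.mpr hin
      · have heq : hi = lo := by omega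
        rw [heq] at hhi ⊢
        rw [bsLoop, if_neg (by omega)]
        exact ⟨hlo, hhi⟩

-- ===== VERDICT (by name: the statement is the Claim_ definition above) =====
theorem longest_backtick_run_spec : Claim_equal_longest_backtick_run := by
  intro s _
  unfold Spec_longest_backtick_run longest_backtick_run longest_backtick_run_alt
  set cs := s.toList with hcs
  -- A's value: the max of the maximal-run lengths
  rw [mainLem cs.length cs (le_refl _) 0 (le_refl _)]
  set M := (btRuns cs).foldl max 0 with hM
  have hM0 : 0 ≤ M := foldl_max_le _ _
  rw [max_eq_right hM0]
  -- B's loop yields r with Q r ∧ ¬Q (r+1)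
  have hq0 : PySem.Chars.isIn (List.replicate 0 '`') cs = true := by
    rw [PySem.Chars.isIn_iff_infix]
    simp
  have hqn : PySem.Chars.isIn (List.replicate (cs.length + 1) '`') cs = false := by
    rw [Bool.eq_false_iff]
    intro h
    rw [PySem.Chars.isIn_iff_infix] at h
    have := h.length_le
    simp at this
  obtain ⟨hr1, hr2⟩ := bsLoop_spec cs cs.length 0 cs.length (by omega) (by omega) hq0 hqn
  set r := bsLoop cs 0 cs.length with hr
  -- M as a Nat
  have hMchar1 : M = 0 ∨ M ∈ btRuns cs := foldl_max_attained _ _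
  -- Q M.toNat
  have hQM : PySem.Chars.isIn (List.replicate M.toNat '`') cs = true := by
    rcases hMchar1 with h | h
    · rw [h]; exact hq0
    · rw [PySem.Chars.isIn_iff_infix]
      refine (repl_infix_iff M.toNat ?_ cs.length cs (le_refl _)).mpr ⟨M, h, by omega⟩
      have := btRuns_pos cs M h
      omega
  -- ¬ Q (M.toNat + 1)
  have hQM1 : PySem.Chars.isIn (List.replicate (M.toNat + 1) '`') cs = false := by
    rw [Bool.eq_false_iff]
    intro h
    rw [PySem.Chars.isIn_iff_infix] at h
    obtain ⟨rr, hrr, hler⟩ := (repl_infix_iff (M.toNat + 1) (by omega) cs.length cs (le_refl _)).mp h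
    have := foldl_max_mem_le (btRuns cs) 0 rr hrr
    omega
  -- uniqueness: r = M.toNat
  have : r = M.toNat := by
    by_contra hne
    rcases Nat.lt_or_ge r M.toNat with h | h
    · have := isIn_antitone cs (r + 1) M.toNat (by omega) hQM
      rw [hr2] at this
      exact Bool.false_ne_true this
    · have hgt : M.toNat < r := by omega
      have := isIn_antitone cs (M.toNat + 1) r (by omega) hr1
      rw [hQM1] at this
      exact Bool.false_ne_true this
  rw [this]
  omega
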